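-- pv_equiv track=rewrite | github.com/huyphuong99/my_project_graduate | file_detection/load_model_detect_frame.py | assign2line
-- ===== SOURCE A (Python) =====
-- def assign2line(value):
--     value = sorted(value, key=(lambda box: box[1][1]))
--     value_row_up = []
--     value_row_down = []
--     for i in range(len(value)):
--         thres_down = int((value[0][1][1] + value[-1][1][1]) / 2) + 5
--         if value[i][1][1] < thres_down:
--             row_up = value[i]
--             value_row_up.append(row_up)
--         else:
--             row_down = value[i]
--             value_row_down.append(row_down)
--     value_row_up = sorted(value_row_up, key=(lambda box: box[1][0]))
--     value_row_down = sorted(value_row_down, key=(lambda box: box[1][0]))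
--     return value_row_up + value_row_down, value_row_down
-- ===== SOURCE B (Python) =====
-- def assign2line(value):
--     value = sorted(value, key=lambda box: box[1][1])
--     if not value:
--         return [], []
--     thres = int((value[0][1][1] + value[-1][1][1]) / 2) + 5
--     # y-values are non-decreasing, so the "up" row is exactly a prefix
--     k = 0
--     while k < len(value) and value[k][1][1] < thres:
--         k += 1
--     value_row_up = sorted(value[:k], key=lambda box: box[1][0])
--     value_row_down = sorted(value[k:], key=lambda box: box[1][0])
--     return value_row_up + value_row_down, value_row_down
-- ===== Notes on version B (the rewrite author's own statement) =====
-- stated objective: simpler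
-- what changed: Instead of classifying every element against a threshold recomputed on each loop iteration, B computes the threshold once and exploits that the y-sorted list is non-decreasing: the up-row is exactly the prefix of elements with y below the threshold, found by a single boundary scan (prefix/suffix split).
import Mathlib
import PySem

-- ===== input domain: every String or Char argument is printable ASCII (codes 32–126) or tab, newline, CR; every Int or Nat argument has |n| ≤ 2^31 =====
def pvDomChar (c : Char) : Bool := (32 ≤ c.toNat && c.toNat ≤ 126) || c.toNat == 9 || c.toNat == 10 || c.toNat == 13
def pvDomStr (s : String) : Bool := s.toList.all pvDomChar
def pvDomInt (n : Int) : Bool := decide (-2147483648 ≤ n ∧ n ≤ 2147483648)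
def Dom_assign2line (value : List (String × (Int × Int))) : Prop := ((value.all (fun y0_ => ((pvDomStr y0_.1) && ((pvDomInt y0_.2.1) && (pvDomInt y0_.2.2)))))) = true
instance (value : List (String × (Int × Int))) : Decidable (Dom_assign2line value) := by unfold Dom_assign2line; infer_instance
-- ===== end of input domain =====

-- B changes the decomposition: one threshold, then a prefix/suffix split of the y-sorted list (objective: simpler).

-- ===== PORT A =====
-- literal transliteration of A: sort by y, loop over indices recomputing the
-- threshold each iteration (int((a+b)/2) = PySem.Int.truncdiv, exact on Dom),
-- appending each element to the up or down accumulator, then sort both by x.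
def assign2line (value : List (String × (Int × Int))) : (List (String × (Int × Int))) × (List (String × (Int × Int))) :=
  let d : String × (Int × Int) := ("", (0, 0))
  let v := PySem.List.sorted value (fun box => box.2.2) false
  let acc := (PySem.List.pyRange 0 (v.length : Int) 1).foldl
    (fun (acc : List (String × (Int × Int)) × List (String × (Int × Int))) i =>
      let thres_down := PySem.Int.truncdiv ((PySem.List.pyGetD v 0 d).2.2 + (PySem.List.pyGetD v (-1) d).2.2) 2 + 5
      if (PySem.List.pyGetD v i d).2.2 < thres_down then
        (acc.1 ++ [PySem.List.pyGetD v i d], acc.2)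
      else
        (acc.1, acc.2 ++ [PySem.List.pyGetD v i d]))
    ([], [])
  let up := PySem.List.sorted acc.1 (fun box => box.2.1) false
  let down := PySem.List.sorted acc.2 (fun box => box.2.1) false
  (up ++ down, down)

-- ===== PORT B =====
-- B: sort by y; empty → ([], []); threshold computed once; the while-loop
-- boundary scan giving value[:k]/value[k:] is exactly takeWhile/dropWhile.
def assign2line_alt (value : List (String × (Int × Int))) : (List (String × (Int × Int))) × (List (String × (Int × Int))) :=
  let s := PySem.List.sorted value (fun box => box.2.2) false
  if hs : s = [] then ([], [])
  else
    let thres := PySem.Int.truncdiv ((s.head hs).2.2 + (s.getLast hs).2.2) 2 + 5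
    let up := PySem.List.sorted (s.takeWhile (fun box => box.2.2 < thres)) (fun box => box.2.1) false
    let down := PySem.List.sorted (s.dropWhile (fun box => box.2.2 < thres)) (fun box => box.2.1) false
    (up ++ down, down)

-- ===== PRECONDITION & SPEC =====
def Spec_assign2line (value : List (String × (Int × Int))) (out : (List (String × (Int × Int))) × (List (String × (Int × Int)))) : Prop := out = assign2line_alt value
instance (value : List (String × (Int × Int))) (out : (List (String × (Int × Int))) × (List (String × (Int × Int)))) : Decidable (Spec_assign2line value out) := by unfold Spec_assign2line; infer_instance

-- ===== CLAIM (what is proved, stated in full; the proofs are below) =====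
def Claim_equal_assign2line : Prop := ∀ (value : List (String × (Int × Int))), Dom_assign2line value → Spec_assign2line value (assign2line value)

-- ===== LEMMAS AND PROOFS =====

theorem pyGetD_zero_head {α : Type} (l : List α) (d : α) (h : l ≠ []) :
    PySem.List.pyGetD l 0 d = l.head h := by
  cases l with
  | nil => exact absurd rfl h
  | cons a t => simp [PySem.List.pyGetD_zero_cons]

-- the pair-accumulating loop splits the list into filter p / filter !p
theorem foldl_pair_filter {α : Type} (key : α → Int) (t : Int) (l : List α)
    (a b : List α) :
    l.foldl (fun (acc : List α × List α) x =>
      if key x < t then (acc.1 ++ [x], acc.2) else (acc.1, acc.2 ++ [x])) (a, b)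
    = (a ++ l.filter (fun x => decide (key x < t)),
       b ++ l.filter (fun x => !decide (key x < t))) := by
  induction l generalizing a b with
  | nil => simp
  | cons x xs ih =>
    by_cases h : key x < t <;> simp [h, ih]

-- on a list non-decreasing in key, filtering "key < t" keeps exactly a prefix
theorem filter_eq_takeWhile_of_pairwise {α : Type} (key : α → Int) (t : Int)
    (l : List α) (h : l.Pairwise (fun a b => key a ≤ key b)) :
    l.filter (fun x => key x < t) = l.takeWhile (fun x => key x < t) ∧
    l.filter (fun x => !decide (key x < t)) = l.dropWhile (fun x => key x < t) := by
  induction l with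
  | nil => simp
  | cons x xs ih =>
    rcases List.pairwise_cons.mp h with ⟨hx, hxs⟩
    rcases ih hxs with ⟨ih1, ih2⟩
    by_cases hp : key x < t
    · simp [hp, ih1, ih2]
    · have hall : ∀ y ∈ xs, ¬ key y < t := fun y hy => by
        have := hx y hy; omega
      have e1 : xs.filter (fun x => decide (key x < t)) = [] :=
        List.filter_eq_nil_iff.mpr (fun y hy => by simpa using hall y hy)
      have e2 : xs.filter (fun x => !decide (key x < t)) = xs :=
        List.filter_eq_self.mpr (fun y hy => by simpa using hall y hy)
      constructor
      · simp [hp, e1]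
      · simp [hp, e2]

theorem assign2line_eq (value : List (String × (Int × Int))) :
    assign2line value = assign2line_alt value := by
  unfold assign2line assign2line_alt
  set s := PySem.List.sorted value (fun box => box.2.2) false with hs
  by_cases h0 : s = []
  · simp [h0, PySem.List.sorted]
  · simp only [dif_neg h0]
    have hhead : PySem.List.pyGetD s 0 ("", (0, 0)) = s.head h0 :=
      pyGetD_zero_head s _ h0
    have hlast : PySem.List.pyGetD s (-1) ("", (0, 0)) = s.getLast h0 :=
      PySem.List.pyGetD_neg_one s ("", (0, 0)) h0
    set t := PySem.Int.truncdiv ((s.head h0).2.2 + (s.getLast h0).2.2) 2 + 5 with ht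
    have hbody : (PySem.List.pyRange 0 (s.length : Int) 1).foldl
        (fun (acc : List (String × (Int × Int)) × List (String × (Int × Int))) i =>
          let thres_down := PySem.Int.truncdiv ((PySem.List.pyGetD s 0 ("", (0,0))).2.2 + (PySem.List.pyGetD s (-1) ("", (0,0))).2.2) 2 + 5
          if (PySem.List.pyGetD s i ("", (0,0))).2.2 < thres_down then
            (acc.1 ++ [PySem.List.pyGetD s i ("", (0,0))], acc.2)
          else
            (acc.1, acc.2 ++ [PySem.List.pyGetD s i ("", (0,0))]))
        ([], [])
        = s.foldl (fun (acc : List (String × (Int × Int)) × List (String × (Int × Int))) x =>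
            if x.2.2 < t then (acc.1 ++ [x], acc.2) else (acc.1, acc.2 ++ [x])) ([], []) := by
      rw [hhead, hlast, ← ht]
      exact PySem.List.foldl_pyRange_zero_pyGetD s ("", (0,0))
        (fun acc x => if x.2.2 < t then (acc.1 ++ [x], acc.2) else (acc.1, acc.2 ++ [x])) ([], [])
    rw [hbody]
    have hsplit := foldl_pair_filter (fun x : String × (Int × Int) => x.2.2) t s [] []
    have hpw : s.Pairwise (fun a b => a.2.2 ≤ b.2.2) :=
      PySem.List.sorted_pairwise value (fun box => box.2.2)
    rcases filter_eq_takeWhile_of_pairwise (fun x => x.2.2) t s hpw with ⟨hf1, hf2⟩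
    simp [hsplit, hf1, hf2]

-- ===== VERDICT (by name: the statement is the Claim_ definition above) =====
theorem assign2line_spec : Claim_equal_assign2line := by
  intro value _
  unfold Spec_assign2line
  exact assign2line_eq value
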